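-- pv_equiv track=rewrite | github.com/Danyaruko/Algorithms_Labs | Lab3/farm.py | find_max_min_distance
-- ===== SOURCE A (Python) =====
-- def is_possible_to_place(aggressive_cows_number, sorted_stables, min_distance):
--     cows_to_place_number = aggressive_cows_number - 1
--     cur_stable_index = 0
--     for stable_index in range(1, len(sorted_stables)):
--         if (sorted_stables[stable_index] - sorted_stables[cur_stable_index]) >= min_distance:
--             cur_stable_index = stable_index
--             cows_to_place_number -= 1
--
--         if cows_to_place_number == 0:
--             return True
--
--     return False
--
-- def find_max_min_distance(aggressive_cows_number, sorted_stable, possible_answers):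
--     if len(possible_answers) == 0:
--         return 0
--
--     if len(possible_answers) == 1:
--         return possible_answers[0]
--
--     current_answer = possible_answers[len(possible_answers) // 2]
--
--     if is_possible_to_place(aggressive_cows_number, sorted_stable, current_answer):
--         next_step = find_max_min_distance(aggressive_cows_number, sorted_stable,
--                                           possible_answers[len(possible_answers) // 2:])
--     else:
--         next_step = find_max_min_distance(
--             aggressive_cows_number, sorted_stable, possible_answers[:len(possible_answers) // 2])
--     return next_step
-- ===== SOURCE B (Python) =====
-- def is_possible_to_place(aggressive_cows_number, sorted_stables, min_distance):
--     cows_to_place_number = aggressive_cows_number - 1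
--     cur_stable_index = 0
--     for stable_index in range(1, len(sorted_stables)):
--         if (sorted_stables[stable_index] - sorted_stables[cur_stable_index]) >= min_distance:
--             cur_stable_index = stable_index
--             cows_to_place_number -= 1
--
--         if cows_to_place_number == 0:
--             return True
--
--     return False
--
-- def find_max_min_distance(aggressive_cows_number, sorted_stable, possible_answers):
--     lo, hi = 0, len(possible_answers)
--     while hi - lo > 1:
--         mid = (hi - lo) // 2
--         if is_possible_to_place(aggressive_cows_number, sorted_stable, possible_answers[lo + mid]):
--             lo += mid
--         else:
--             hi = lo + mid
--     return possible_answers[lo] if hi - lo == 1 else 0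
-- ===== Notes on version B (the rewrite author's own statement) =====
-- stated objective: simpler
-- what changed: Replaces A's recursion over copied list slices by an iterative binary search that moves integer bounds lo/hi over the original list (is_possible_to_place kept identical).
import Mathlib
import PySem

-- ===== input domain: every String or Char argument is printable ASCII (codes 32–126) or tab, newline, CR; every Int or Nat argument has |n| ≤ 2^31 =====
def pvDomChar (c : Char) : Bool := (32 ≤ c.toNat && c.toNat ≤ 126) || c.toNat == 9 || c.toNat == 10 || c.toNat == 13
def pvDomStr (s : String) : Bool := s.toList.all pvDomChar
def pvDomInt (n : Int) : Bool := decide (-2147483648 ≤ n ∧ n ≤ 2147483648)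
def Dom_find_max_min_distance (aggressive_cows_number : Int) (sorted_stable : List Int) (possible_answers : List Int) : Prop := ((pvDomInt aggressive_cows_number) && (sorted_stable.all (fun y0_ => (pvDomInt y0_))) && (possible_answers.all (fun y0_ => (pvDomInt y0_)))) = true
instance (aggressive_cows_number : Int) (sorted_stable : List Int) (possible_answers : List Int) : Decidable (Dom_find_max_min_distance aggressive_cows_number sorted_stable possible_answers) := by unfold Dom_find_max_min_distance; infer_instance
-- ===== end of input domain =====

-- B replaces A's recursion over list slices by an iterative binary search on index bounds (lo, hi)
-- into the original list (objective: simpler; no slice copies, but asymptotics unchanged).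

-- ===== PORT A =====
-- helper is_possible_to_place: 'for stable_index in range(1, len)' with early return, as index recursion
def ippGo (sorted_stables : List Int) (min_distance : Int) (i cur : Nat) (cows : Int) : Bool :=
  if i < sorted_stables.length then
    let p := if sorted_stables.getD i 0 - sorted_stables.getD cur 0 ≥ min_distance
             then (i, cows - 1) else (cur, cows)
    if p.2 = 0 then true else ippGo sorted_stables min_distance (i + 1) p.1 p.2
  else false
termination_by sorted_stables.length - i

def is_possible_to_place (aggressive_cows_number : Int) (sorted_stables : List Int) (min_distance : Int) : Bool :=
  ippGo sorted_stables min_distance 1 0 (aggressive_cows_number - 1)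

lemma slice_from_len_lt (pa : List Int) (h2 : 2 ≤ pa.length) :
    (PySem.List.slice pa (some ((pa.length / 2 : Nat) : Int)) none).length < pa.length := by
  rw [PySem.List.slice_from_natCast]; simp; omega

lemma slice_to_len_lt (pa : List Int) (h2 : 2 ≤ pa.length) :
    (PySem.List.slice pa none (some ((pa.length / 2 : Nat) : Int))).length < pa.length := by
  rw [PySem.List.slice_to_natCast]; simp; omega

def find_max_min_distance (aggressive_cows_number : Int) (sorted_stable : List Int) (possible_answers : List Int) : Int :=
  if possible_answers.length = 0 then 0
  else if possible_answers.length = 1 then possible_answers.getD 0 0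
  else
    let mid := possible_answers.length / 2
    let current_answer := possible_answers.getD mid 0
    if is_possible_to_place aggressive_cows_number sorted_stable current_answer then
      find_max_min_distance aggressive_cows_number sorted_stable
        (PySem.List.slice possible_answers (some (mid : Int)) none)
    else
      find_max_min_distance aggressive_cows_number sorted_stable
        (PySem.List.slice possible_answers none (some (mid : Int)))
termination_by possible_answers.length
decreasing_by
  · exact slice_from_len_lt possible_answers (by omega)
  · exact slice_to_len_lt possible_answers (by omega)

-- ===== PORT B =====
-- the while loop 'while hi - lo > 1: …' as recursion on hi - lo
def bsGo (aggressive_cows_number : Int) (sorted_stable : List Int) (possible_answers : List Int) (lo hi : Nat) : Nat × Nat :=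
  if 1 < hi - lo then
    let mid := (hi - lo) / 2
    if is_possible_to_place aggressive_cows_number sorted_stable (possible_answers.getD (lo + mid) 0) then
      bsGo aggressive_cows_number sorted_stable possible_answers (lo + mid) hi
    else
      bsGo aggressive_cows_number sorted_stable possible_answers lo (lo + mid)
  else (lo, hi)
termination_by hi - lo
decreasing_by all_goals omega

def find_max_min_distance_alt (aggressive_cows_number : Int) (sorted_stable : List Int) (possible_answers : List Int) : Int :=
  let p := bsGo aggressive_cows_number sorted_stable possible_answers 0 possible_answers.length
  if p.2 - p.1 = 1 then possible_answers.getD p.1 0 else 0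

-- ===== PRECONDITION & SPEC =====
def Spec_find_max_min_distance (aggressive_cows_number : Int) (sorted_stable : List Int) (possible_answers : List Int) (out : Int) : Prop := out = find_max_min_distance_alt aggressive_cows_number sorted_stable possible_answers
instance (aggressive_cows_number : Int) (sorted_stable : List Int) (possible_answers : List Int) (out : Int) : Decidable (Spec_find_max_min_distance aggressive_cows_number sorted_stable possible_answers out) := by unfold Spec_find_max_min_distance; infer_instance

-- ===== CLAIM (what is proved, stated in full; the proofs are below) =====
def Claim_equal_find_max_min_distance : Prop := ∀ (aggressive_cows_number : Int) (sorted_stable : List Int) (possible_answers : List Int), Dom_find_max_min_distance aggressive_cows_number sorted_stable possible_answers → Spec_find_max_min_distance aggressive_cows_number sorted_stable possible_answers (find_max_min_distance aggressive_cows_number sorted_stable possible_answers)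

-- ===== LEMMAS AND PROOFS =====

-- A on the slice pa[lo:hi] computes what B's loop computes on the index range [lo, hi)
lemma key (c : Int) (ss : List Int) :
    ∀ n (pa : List Int) (lo hi : Nat), lo ≤ hi → hi ≤ pa.length → hi - lo = n →
    find_max_min_distance c ss ((pa.drop lo).take (hi - lo)) =
      (let p := bsGo c ss pa lo hi; if p.2 - p.1 = 1 then pa.getD p.1 0 else 0) := by
  intro n
  induction n using Nat.strong_induction_on with
  | _ n ih =>
    intro pa lo hi hle hhi hn
    subst hn
    have hlen : ((pa.drop lo).take (hi - lo)).length = hi - lo := by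
      simp; omega
    have hget : ∀ i, i < hi - lo → ((pa.drop lo).take (hi - lo)).getD i 0 = pa.getD (lo + i) 0 := by
      intro i hi'
      simp [List.getD, List.getElem?_drop, hi']
    by_cases h0 : hi - lo = 0
    · rw [bsGo]
      rw [find_max_min_distance]
      simp [h0]
    · by_cases h1 : hi - lo = 1
      · rw [bsGo, find_max_min_distance, hlen]
        rw [if_neg (show ¬ 1 < hi - lo by omega), if_neg h0, if_pos h1]
        simp [h1]
      · -- hi - lo ≥ 2 : one step of A's recursion matches one iteration of B's loop
        have h2 : 2 ≤ hi - lo := by omega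
        have hmlt : (hi - lo) / 2 < hi - lo := by omega
        have hdropEq : PySem.List.slice ((pa.drop lo).take (hi - lo)) (some (((hi - lo) / 2 : Nat) : Int)) none
            = (pa.drop (lo + (hi - lo) / 2)).take (hi - (lo + (hi - lo) / 2)) := by
          rw [PySem.List.slice_from_natCast, List.drop_take, List.drop_drop]
          congr 1
          omega
        have htakeEq : PySem.List.slice ((pa.drop lo).take (hi - lo)) none (some (((hi - lo) / 2 : Nat) : Int))
            = (pa.drop lo).take ((lo + (hi - lo) / 2) - lo) := by
          rw [PySem.List.slice_to_natCast, List.take_take]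
          congr 1
          omega
        rw [bsGo, find_max_min_distance, hlen]
        rw [if_neg h0, if_neg h1, if_pos (show 1 < hi - lo by omega)]
        simp only []
        rw [hget _ hmlt, hdropEq, htakeEq]
        by_cases hpos : is_possible_to_place c ss (pa.getD (lo + (hi - lo) / 2) 0) = true
        · rw [if_pos hpos, if_pos hpos]
          have := ih (hi - (lo + (hi - lo) / 2)) (by omega) pa (lo + (hi - lo) / 2) hi (by omega) hhi rfl
          simpa using this
        · rw [if_neg hpos, if_neg hpos]
          have := ih ((lo + (hi - lo) / 2) - lo) (by omega) pa lo (lo + (hi - lo) / 2) (by omega) (by omega) rfl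
          simpa using this

-- ===== VERDICT (by name: the statement is the Claim_ definition above) =====
theorem find_max_min_distance_spec : Claim_equal_find_max_min_distance := by
  intro c ss pa _
  unfold Spec_find_max_min_distance find_max_min_distance_alt
  have h := key c ss pa.length pa 0 pa.length (Nat.zero_le _) le_rfl rfl
  simpa using h
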